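-- pv_equiv track=rewrite | github.com/unlimitediw/CheckCode | 0.算法/20180813.py | wiggleMaxLengthDeleteNotAllowed
-- ===== SOURCE A (Python) =====
-- def wiggleMaxLengthDeleteNotAllowed(nums):
--     """
--     :type nums: List[int]
--     :rtype: int
--     """
--
--     if not nums:
--         return 0
--     elif len(nums) == 1:
--         return 1
--     elif len(nums) == 2:
--         if nums[0] == nums[1]:
--             return 1
--         else:
--             return 2
--     else:
--         maxCount = 2
--         start = 0
--         pre = nums[1]
--         if nums[1] > nums[0]:
--             # 1 means positiva
--             preLogic = 1
--         elif nums[1] < nums[0]: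
--             preLogic = -1
--         else:
--             preLogic = 0
--             maxCount = 1
--         for i in range(2, len(nums)):
--             if preLogic == 0:
--                 if nums[i] > pre:
--                     start = i - 1
--                     preLogic = 1
--                 elif nums[i] < pre:
--                     start = i - 1
--                     preLogic = -1
--             elif preLogic == 1:
--                 if nums[i] > pre:
--                     if i - start > maxCount:
--                         maxCount = i - start
--                     start = i - 1
--                 elif nums[i] < pre:
--                     preLogic = -1
--                 else:
--                     preLogic = 0
--                     if i - start > maxCount:
--                         maxCount = i - start
--             else:
--                 if nums[i] > pre:
--                     preLogic = 1
--                 elif nums[i] < pre: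
--                     if i - start > maxCount:
--                         maxCount = i - start
--                     start = i - 1
--                 else:
--                     preLogic = 0
--                     if i - start > maxCount:
--                         maxCount = i - start
--             pre = nums[i]
--         if preLogic != 0:
--             if len(nums) - start > maxCount:
--                 maxCount = len(nums) - start
--         return maxCount
-- ===== SOURCE B (Python) =====
-- def wiggleMaxLengthDeleteNotAllowed(nums):
--     if not nums:
--         return 0
--     best = 1
--     cur = 1
--     prev_d = 0
--     for i in range(1, len(nums)):
--         d = nums[i] - nums[i-1]
--         if d == 0:
--             cur = 1
--         elif prev_d == 0 or (d > 0) == (prev_d > 0):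
--             cur = 2
--         else:
--             cur += 1
--         if cur > best:
--             best = cur
--         prev_d = d
--     return best
-- ===== Notes on version B (the rewrite author's own statement) =====
-- stated objective: simpler
-- what changed: Replaces A's tri-state preLogic flag plus run-start index (with i-start subtractions, a pre variable and a post-loop fixup, and separate len 0/1/2 special cases) by a single uniform forward pass keeping a running run-length counter cur and the previous difference, updating the maximum inline with no post-loop step.
import Mathlib
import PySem

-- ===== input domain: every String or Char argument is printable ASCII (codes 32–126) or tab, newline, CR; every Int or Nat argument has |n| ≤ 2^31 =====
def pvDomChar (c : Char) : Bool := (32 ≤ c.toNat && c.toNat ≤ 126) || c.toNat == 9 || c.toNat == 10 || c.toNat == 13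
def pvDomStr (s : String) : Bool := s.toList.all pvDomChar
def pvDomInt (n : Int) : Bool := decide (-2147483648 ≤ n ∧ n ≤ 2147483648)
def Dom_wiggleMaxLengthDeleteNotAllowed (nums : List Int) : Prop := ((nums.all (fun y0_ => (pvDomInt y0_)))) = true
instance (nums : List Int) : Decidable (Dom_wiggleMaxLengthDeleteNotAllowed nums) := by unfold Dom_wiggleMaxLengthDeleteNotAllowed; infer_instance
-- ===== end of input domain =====

-- B replaces A's tri-state preLogic flag + run-start index + post-loop fixup by one uniform
-- pass with a running run-length counter; objective: simpler (same O(n) cost).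

-- ===== PORT A =====
-- A's loop 'for i in range(2, len(nums))' as structural recursion over the remaining
-- elements, carrying the index i and the state (maxCount, start, pre, preLogic).
def pvALoop (rest : List Int) (i maxCount start pre preLogic : Int) : Int × Int × Int :=
  match rest with
  | [] => (maxCount, start, preLogic)
  | x :: t =>
    if preLogic = 0 then
      if x > pre then pvALoop t (i+1) maxCount (i-1) x 1
      else if x < pre then pvALoop t (i+1) maxCount (i-1) x (-1)
      else pvALoop t (i+1) maxCount start x preLogic
    else if preLogic = 1 then
      if x > pre then
        pvALoop t (i+1) (if i - start > maxCount then i - start else maxCount) (i-1) x 1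
      else if x < pre then pvALoop t (i+1) maxCount start x (-1)
      else pvALoop t (i+1) (if i - start > maxCount then i - start else maxCount) start x 0
    else
      if x > pre then pvALoop t (i+1) maxCount start x 1
      else if x < pre then
        pvALoop t (i+1) (if i - start > maxCount then i - start else maxCount) (i-1) x (-1)
      else pvALoop t (i+1) (if i - start > maxCount then i - start else maxCount) start x 0

-- A's code after the loop: 'if preLogic != 0: if len(nums) - start > maxCount: ...; return maxCount'
def pvAFin (n : Int) (r : Int × Int × Int) : Int :=
  if r.2.2 ≠ 0 then (if n - r.2.1 > r.1 then n - r.2.1 else r.1) else r.1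

def wiggleMaxLengthDeleteNotAllowed (nums : List Int) : Int :=
  match nums with
  | [] => 0
  | [_] => 1
  | [a, b] => if a = b then 1 else 2
  | a :: b :: t =>
    let init : Int × Int := if b > a then (2, 1) else if b < a then (2, -1) else (1, 0)
    pvAFin ((a :: b :: t).length : Int) (pvALoop t 2 init.1 0 b init.2)

-- ===== PORT B =====
-- Source B's loop: state (prev element, best, cur, prev_d), one step per element.
def pvBLoop (rest : List Int) (prev best cur prevD : Int) : Int :=
  match rest with
  | [] => best
  | x :: t =>
    let d := x - prev
    let cur' := if d = 0 then 1 else if prevD = 0 ∨ ((d > 0) ↔ (prevD > 0)) then 2 else cur + 1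
    let best' := if cur' > best then cur' else best
    pvBLoop t x best' cur' d

def wiggleMaxLengthDeleteNotAllowed_alt (nums : List Int) : Int :=
  match nums with
  | [] => 0
  | x :: t => pvBLoop t x 1 1 0

-- ===== PRECONDITION & SPEC =====
def Spec_wiggleMaxLengthDeleteNotAllowed (nums : List Int) (out : Int) : Prop := out = wiggleMaxLengthDeleteNotAllowed_alt nums
instance (nums : List Int) (out : Int) : Decidable (Spec_wiggleMaxLengthDeleteNotAllowed nums out) := by unfold Spec_wiggleMaxLengthDeleteNotAllowed; infer_instance

-- ===== CLAIM (what is proved, stated in full; the proofs are below) =====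
def Claim_equal_wiggleMaxLengthDeleteNotAllowed : Prop := ∀ (nums : List Int), Dom_wiggleMaxLengthDeleteNotAllowed nums → Spec_wiggleMaxLengthDeleteNotAllowed nums (wiggleMaxLengthDeleteNotAllowed nums)

-- ===== LEMMAS AND PROOFS =====

-- Loop invariant: A's (maxCount, start, preLogic) and B's (best, cur, prevD) describe the
-- same alternating run ending at the element just processed (index i-1):
--   preLogic is the sign of prevD;
--   if prevD ≠ 0 the current run starts at A's 'start', cur = i - start and best = max(maxCount, cur);
--   if prevD = 0 then cur = 1 and best = maxCount (A already folded the ended run into maxCount).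
theorem pvLoop_eq (t : List Int) :
    ∀ (i maxCount start pre prevD best cur preLogic : Int),
    (preLogic = 1 ↔ 0 < prevD) → (preLogic = -1 ↔ prevD < 0) → (preLogic = 0 ↔ prevD = 0) →
    (1 ≤ maxCount ∧ 1 ≤ best ∧ 1 ≤ cur) →
    (prevD ≠ 0 → cur = i - start ∧ maxCount ≤ best ∧ cur ≤ best ∧ (best = maxCount ∨ best = cur)) →
    (prevD = 0 → cur = 1 ∧ best = maxCount) →
    pvAFin (i + (t.length : Int)) (pvALoop t i maxCount start pre preLogic)
      = pvBLoop t pre best cur prevD := by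
  induction t with
  | nil =>
    intro i maxCount start pre prevD best cur preLogic h1 h2 h3 h0 h4 h5
    simp only [pvALoop, pvBLoop, pvAFin, List.length_nil]
    split_ifs <;> omega
  | cons x t ih =>
    intro i maxCount start pre prevD best cur preLogic h1 h2 h3 h0 h4 h5
    have harith : i + (((x :: t).length : Int)) = (i + 1) + (t.length : Int) := by
      simp; omega
    rw [harith]
    simp only [pvALoop, pvBLoop]
    split_ifs <;> first | omega | (apply ih <;> omega)

-- ===== VERDICT (by name: the statement is the Claim_ definition above) =====
theorem wiggleMaxLengthDeleteNotAllowed_spec : Claim_equal_wiggleMaxLengthDeleteNotAllowed := by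
  intro nums _
  unfold Spec_wiggleMaxLengthDeleteNotAllowed
  match nums with
  | [] => rfl
  | [a] => rfl
  | [a, b] =>
    simp only [wiggleMaxLengthDeleteNotAllowed, wiggleMaxLengthDeleteNotAllowed_alt, pvBLoop]
    split_ifs <;> omega
  | a :: b :: c :: t =>
    simp only [wiggleMaxLengthDeleteNotAllowed, wiggleMaxLengthDeleteNotAllowed_alt]
    have hstep : pvBLoop (b :: c :: t) a 1 1 0
        = pvBLoop (c :: t) b (if b - a = 0 then 1 else 2) (if b - a = 0 then 1 else 2)
            (b - a) := by
      conv_lhs => rw [pvBLoop]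
      split_ifs <;> first | rfl | omega
    rw [hstep]
    have hlen : ((a :: b :: c :: t).length : Int) = 2 + ((c :: t).length : Int) := by
      simp; omega
    rw [hlen]
    rcases lt_trichotomy a b with h | h | h
    · rw [if_pos h, if_neg (by omega : ¬ b - a = 0)]
      exact pvLoop_eq (c :: t) 2 2 0 b (b - a) 2 2 1
        (by omega) (by omega) (by omega) (by omega) (by omega) (by omega)
    · rw [if_neg (by omega : ¬ a < b), if_neg (by omega : ¬ b < a),
        if_pos (by omega : b - a = 0)]
      exact pvLoop_eq (c :: t) 2 1 0 b (b - a) 1 1 0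
        (by omega) (by omega) (by omega) (by omega) (by omega) (by omega)
    · rw [if_neg (by omega : ¬ a < b), if_pos (show b < a from h),
        if_neg (by omega : ¬ b - a = 0)]
      exact pvLoop_eq (c :: t) 2 2 0 b (b - a) 2 2 (-1)
        (by omega) (by omega) (by omega) (by omega) (by omega) (by omega)
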